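-- pv_equiv track=rewrite | github.com/therealharish/Problem-Solving | Hackerrank/Construct the Array.py | countArray
-- ===== SOURCE A (Python) =====
-- def countArray(n, k, x):
--   if(x!=1):
--     A = [0]*n
--     B = [1]*n
--   if(x==1):
--     A=[1]*n
--     B=[0]*n
--   mod = 10**9 + 7
--   for i in range(1, n):
--     A[i] = B[i-1]%mod
--     B[i] = ((A[i-1]+B[i-1])*(k-1) - A[i])%mod
--   return A[-1]%mod
-- ===== SOURCE B (Python) =====
-- def countArray(n, k, x):
--     # Closed form: the DP solves a 2-term linear recurrence whose answer is an
--     # alternating geometric sum in (k-1); compute it in O(log n) by doubling.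
--     mod = 10**9 + 7
--     r = (-(k - 1)) % mod
--
--     def geo(m):
--         # sum_{j<m} r^j  (mod mod), by doubling
--         if m == 0:
--             return 0
--         h = geo(m // 2)
--         s = (h * (1 + pow(r, m // 2, mod))) % mod
--         if m % 2 == 1:
--             s = (s + pow(r, m - 1, mod)) % mod
--         return s
--
--     def S(m):
--         # ((k-1)^m - (-1)^m)/k  (mod mod)  = (-1)^(m-1) * geo(m)
--         sign = 1 if m % 2 == 1 else -1
--         return (sign * geo(m)) % mod
--
--     if x == 1:
--         if n == 1:
--             return 1 % mod
--         return ((k - 1) * S(n - 2)) % mod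
--     else:
--         return S(n - 1)
-- ===== Notes on version B (the rewrite author's own statement) =====
-- stated objective: faster
-- what changed: Replaces the O(n) two-array DP with the closed form of its linear recurrence (roots k-1 and -1): an alternating geometric sum in k-1 computed mod 10^9+7 in O(log n) by doubling, which avoids modular inverses so it is exact even when k is divisible by the modulus.
import Mathlib
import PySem

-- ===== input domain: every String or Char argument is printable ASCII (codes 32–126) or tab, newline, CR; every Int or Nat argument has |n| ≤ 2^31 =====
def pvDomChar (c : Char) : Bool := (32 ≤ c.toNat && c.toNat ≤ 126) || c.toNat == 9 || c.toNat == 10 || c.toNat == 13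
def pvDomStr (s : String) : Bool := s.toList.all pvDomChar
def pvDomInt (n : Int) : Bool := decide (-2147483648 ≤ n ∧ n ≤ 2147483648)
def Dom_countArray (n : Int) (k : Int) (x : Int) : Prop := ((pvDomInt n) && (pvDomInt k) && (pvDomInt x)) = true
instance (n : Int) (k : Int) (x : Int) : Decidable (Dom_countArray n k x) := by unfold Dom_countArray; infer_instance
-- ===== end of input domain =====

-- B replaces A's O(n) two-array DP by the closed-form alternating geometric sum in (k-1),
-- computed in O(log n) by doubling (objective: faster, asymptotic).

-- ===== PORT A =====
-- loop body of A: A[i] = B[i-1]%mod; B[i] = ((A[i-1]+B[i-1])*(k-1) - A[i])%mod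
-- (list reads use pyGet? with .getD 0; inside Pre_ every index is in range, so the default is never used)
def pvStepA (k : Int) (st : List Int × List Int) (i : Int) : List Int × List Int :=
  let A := st.1.set i.toNat (PySem.Int.mod ((PySem.List.pyGet? st.2 (i - 1)).getD 0) (10 ^ 9 + 7))
  let B := st.2.set i.toNat (PySem.Int.mod
    ((((PySem.List.pyGet? A (i - 1)).getD 0) + ((PySem.List.pyGet? st.2 (i - 1)).getD 0)) * (k - 1)
      - ((PySem.List.pyGet? A i).getD 0)) (10 ^ 9 + 7))
  (A, B)

def countArray (n : Int) (k : Int) (x : Int) : Int :=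
  let A0 : List Int := if x ≠ 1 then List.replicate n.toNat 0 else List.replicate n.toNat 1
  let B0 : List Int := if x ≠ 1 then List.replicate n.toNat 1 else List.replicate n.toNat 0
  let st := (PySem.List.pyRange 1 n 1).foldl (pvStepA k) (A0, B0)
  PySem.Int.mod ((PySem.List.pyGet? st.1 (-1)).getD 0) (10 ^ 9 + 7)

-- ===== PORT B =====
def pvP : Int := 10 ^ 9 + 7

-- Python's three-argument pow(b, e, 10**9+7): binary modular exponentiation
def pvPowMod (b : Int) (e : Nat) : Int :=
  if e = 0 then PySem.Int.mod 1 pvP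
  else
    let h := pvPowMod b (e / 2)
    let h2 := PySem.Int.mod (h * h) pvP
    if e % 2 = 1 then PySem.Int.mod (h2 * b) pvP else h2
termination_by e
decreasing_by omega

-- geo(m) = sum_{j<m} r^j (mod pvP) by doubling
def pvGeo (r : Int) (m : Nat) : Int :=
  if m = 0 then 0
  else
    let s := PySem.Int.mod (pvGeo r (m / 2) * (1 + pvPowMod r (m / 2))) pvP
    if m % 2 = 1 then PySem.Int.mod (s + pvPowMod r (m - 1)) pvP else s
termination_by m
decreasing_by omega

-- S(m) = ((k-1)^m - (-1)^m)/k (mod pvP) = (-1)^(m-1) * geo(m)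
def pvS (r : Int) (m : Nat) : Int :=
  PySem.Int.mod ((if m % 2 = 1 then 1 else -1) * pvGeo r m) pvP

def countArray_alt (n : Int) (k : Int) (x : Int) : Int :=
  let r := PySem.Int.mod (-(k - 1)) pvP
  if x = 1 then
    if n = 1 then PySem.Int.mod 1 pvP
    else PySem.Int.mod ((k - 1) * pvS r (n - 2).toNat) pvP
  else pvS r (n - 1).toNat

-- ===== PRECONDITION & SPEC =====
-- Pre_ excludes n ≤ 0, where A raises IndexError (A[-1] on an empty list).
def Pre_countArray (n : Int) (k : Int) (x : Int) : Prop := 1 ≤ n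
instance (n : Int) (k : Int) (x : Int) : Decidable (Pre_countArray n k x) := by unfold Pre_countArray; infer_instance
def pvWitness_countArray : Int × Int × Int := (5, 3, 2)

def Spec_countArray (n : Int) (k : Int) (x : Int) (out : Int) : Prop := out = countArray_alt n k x
instance (n : Int) (k : Int) (x : Int) (out : Int) : Decidable (Spec_countArray n k x out) := by unfold Spec_countArray; infer_instance

-- ===== CLAIM (what is proved, stated in full; the proofs are below) =====
def Claim_equal_countArray : Prop := ∀ (n : Int) (k : Int) (x : Int), Dom_countArray n k x → Pre_countArray n k x → Spec_countArray n k x (countArray n k x)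

-- ===== LEMMAS AND PROOFS =====

def pvPN : Nat := 1000000007

-- the two DP cells (A[m], B[m]) as an explicit sequence
def pvSeq (k : Int) (a0 : Int) (b0 : Int) : Nat → Int × Int
  | 0 => (a0, b0)
  | m + 1 =>
    let ab := pvSeq k a0 b0 m
    let a' := PySem.Int.mod ab.2 (10 ^ 9 + 7)
    (a', PySem.Int.mod ((ab.1 + ab.2) * (k - 1) - a') (10 ^ 9 + 7))

def pvT (ρ : ZMod pvPN) (m : Nat) : ZMod pvPN := ∑ j ∈ Finset.range m, ρ ^ j
def pvC (κ : ZMod pvPN) (m : Nat) : ZMod pvPN := (-1) ^ (m + 1) * pvT (-κ) m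

lemma pv_cast_mod (a : Int) : ((PySem.Int.mod a (10 ^ 9 + 7) : Int) : ZMod pvPN) = (a : ZMod pvPN) := by
  rw [PySem.Int.mod_eq_emod_of_pos (by norm_num)]
  have h : (10 ^ 9 + 7 : Int) = ((pvPN : Nat) : Int) := by norm_num [pvPN]
  rw [h, ZMod.intCast_mod]

lemma pv_cast_modP (a : Int) : ((PySem.Int.mod a pvP : Int) : ZMod pvPN) = (a : ZMod pvPN) := by
  have h : pvP = (10 ^ 9 + 7 : Int) := rfl
  rw [h, pv_cast_mod]

lemma pv_cast_mod'' (a : Int) : ((PySem.Int.mod a 1000000007 : Int) : ZMod pvPN) = (a : ZMod pvPN) := by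
  have h : (1000000007 : Int) = (10 ^ 9 + 7 : Int) := by norm_num
  rw [h, pv_cast_mod]

lemma pvC_succ (κ : ZMod pvPN) (m : Nat) : pvC κ (m + 1) = -pvC κ m + κ ^ m := by
  simp only [pvC, pvT, Finset.sum_range_succ]
  rw [neg_pow κ m]
  have he : ((-1 : ZMod pvPN)) ^ (m * 2) = 1 := by
    rw [pow_mul, sq, ← mul_pow]; norm_num
  ring_nf
  rw [he]
  ring

lemma pvC_rec (κ : ZMod pvPN) (m : Nat) :
    pvC κ (m + 2) = κ * pvC κ m + (κ - 1) * pvC κ (m + 1) := by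
  have h1 := pvC_succ κ m
  have h2 := pvC_succ κ (m + 1)
  rw [show m + 2 = (m + 1) + 1 from rfl] at *
  rw [h2, h1]
  ring

lemma pvPowMod_cast (b : Int) (e : Nat) :
    ((pvPowMod b e : Int) : ZMod pvPN) = (b : ZMod pvPN) ^ e := by
  induction e using Nat.strong_induction_on with
  | _ e ih =>
    rw [pvPowMod]
    by_cases h0 : e = 0
    · subst h0
      simp [pv_cast_modP]
    · rw [if_neg h0]
      have ihe := ih (e / 2) (by omega)
      have hpow : (b : ZMod pvPN) ^ e = ((b : ZMod pvPN) ^ (e / 2)) ^ 2 * (b : ZMod pvPN) ^ (e % 2) := by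
        rw [← pow_mul, ← pow_add]
        congr 1
        omega
      split_ifs with hodd
      · simp only [pv_cast_modP, Int.cast_mul, ihe, hpow, hodd]
        ring
      · simp only [pv_cast_modP, Int.cast_mul, ihe, hpow,
          show e % 2 = 0 from by omega]
        ring

lemma pvGeo_cast (r : Int) (m : Nat) : ((pvGeo r m : Int) : ZMod pvPN) = pvT (r : ZMod pvPN) m := by
  induction m using Nat.strong_induction_on with
  | _ m ih =>
    rw [pvGeo]
    by_cases h0 : m = 0
    · subst h0; simp [pvT]
    · have ihm := ih (m / 2) (by omega)
      rw [if_neg h0]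
      have hsplit : pvT (r : ZMod pvPN) m
          = pvT (r : ZMod pvPN) (m / 2) * (1 + (r : ZMod pvPN) ^ (m / 2))
            + (if m % 2 = 1 then (r : ZMod pvPN) ^ (m - 1) else 0) := by
        rcases Nat.even_or_odd m with he | ho
        · obtain ⟨h, hh⟩ := he
          have h2 : m / 2 = h := by omega
          rw [show m % 2 = 0 by omega]
          simp only [pvT]
          rw [h2, show m = h + h by omega, Finset.sum_range_add]
          simp only [pow_add]
          norm_num
          rw [← Finset.mul_sum]
          ring
        · obtain ⟨h, hh⟩ := ho
          have h2 : m / 2 = h := by omega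
          rw [show m % 2 = 1 by omega]
          simp only [pvT]
          rw [h2, show m = (h + h) + 1 by omega, Finset.sum_range_succ, Finset.sum_range_add,
            show (h + h + 1) - 1 = h + h by omega]
          simp only [pow_add]
          norm_num
          rw [← Finset.mul_sum]
          ring
      rw [hsplit]
      split_ifs with hodd
      · simp only [pv_cast_modP, pvPowMod_cast, Int.cast_add, Int.cast_mul, Int.cast_one, ihm]
      · simp only [pv_cast_modP, pvPowMod_cast, Int.cast_add, Int.cast_mul, Int.cast_one, ihm]
        simp

lemma pvS_cast (r : Int) (m : Nat) :
    ((pvS r m : Int) : ZMod pvPN) = (-1) ^ (m + 1) * pvT (r : ZMod pvPN) m := by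
  simp only [pvS, pv_cast_modP, Int.cast_mul]
  split_ifs with hodd
  · simp only [Int.cast_one, one_mul, pvGeo_cast]
    rw [Even.neg_one_pow (Nat.even_iff.mpr (by omega))]
    ring
  · simp only [Int.cast_neg, Int.cast_one, pvGeo_cast]
    rw [Odd.neg_one_pow (Nat.odd_iff.mpr (by omega))]

-- closed form of the DP sequence, x ≠ 1 case
lemma pvSeq_cast_ne1 (k : Int) (m : Nat) :
    (((pvSeq k 0 1 m).1 : ZMod pvPN) = pvC ((k : ZMod pvPN) - 1) m) ∧
    (((pvSeq k 0 1 m).2 : ZMod pvPN) = pvC ((k : ZMod pvPN) - 1) (m + 1)) := by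
  induction m with
  | zero => constructor <;> simp [pvSeq, pvC, pvT]
  | succ m ih =>
    obtain ⟨ih1, ih2⟩ := ih
    simp only [pvSeq]
    constructor
    · rw [pv_cast_mod]
      exact ih2
    · rw [pv_cast_mod]
      push_cast
      rw [pv_cast_mod'', ih1, ih2, show m + 1 + 1 = m + 2 from rfl, pvC_rec]
      ring

-- closed form of the DP sequence, x = 1 case
def pvD (κ : ZMod pvPN) : Nat → ZMod pvPN
  | 0 => 1
  | m + 1 => κ * pvC κ m

lemma pvSeq_cast_eq1 (k : Int) (m : Nat) :
    (((pvSeq k 1 0 m).1 : ZMod pvPN) = pvD ((k : ZMod pvPN) - 1) m) ∧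
    (((pvSeq k 1 0 m).2 : ZMod pvPN) = pvD ((k : ZMod pvPN) - 1) (m + 1)) := by
  induction m with
  | zero => constructor <;> simp [pvSeq, pvD, pvC, pvT]
  | succ m ih =>
    obtain ⟨ih1, ih2⟩ := ih
    simp only [pvSeq]
    constructor
    · rw [pv_cast_mod]
      exact ih2
    · rw [pv_cast_mod]
      push_cast
      rw [pv_cast_mod'', ih1, ih2]
      match m with
      | 0 => simp [pvD, pvC, pvT]
      | j + 1 =>
        simp only [pvD]
        rw [show j + 1 + 1 = j + 2 from rfl, pvC_rec]
        ring

-- the list fold of A computes pvSeq in cells 0..t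
lemma pv_fold_inv (k a0 b0 : Int) (N t : Nat) (ht : t < N) :
    ((PySem.List.pyRange 1 (1 + (t : Int)) 1).foldl (pvStepA k)
        (List.replicate N a0, List.replicate N b0)).1.length = N ∧
    ((PySem.List.pyRange 1 (1 + (t : Int)) 1).foldl (pvStepA k)
        (List.replicate N a0, List.replicate N b0)).2.length = N ∧
    ∀ j : Nat, j ≤ t →
      ((PySem.List.pyRange 1 (1 + (t : Int)) 1).foldl (pvStepA k)
          (List.replicate N a0, List.replicate N b0)).1[j]? = some ((pvSeq k a0 b0 j).1) ∧
      ((PySem.List.pyRange 1 (1 + (t : Int)) 1).foldl (pvStepA k)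
          (List.replicate N a0, List.replicate N b0)).2[j]? = some ((pvSeq k a0 b0 j).2) := by
  induction t with
  | zero =>
    rw [show (1 + ((0:Nat) : Int)) = 1 from by norm_num,
      show PySem.List.pyRange 1 1 1 = [] from by simp]
    refine ⟨by simp, by simp, ?_⟩
    intro j hj
    have hj0 : j = 0 := by omega
    subst hj0
    constructor <;> simp [pvSeq, ht]
  | succ t ih =>
    obtain ⟨h1, h2, h3⟩ := ih (by omega)
    have hr : PySem.List.pyRange 1 (1 + ((t + 1 : Nat) : Int)) 1
        = PySem.List.pyRange 1 (1 + (t : Int)) 1 ++ [1 + (t : Int)] := by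
      rw [show (1 + ((t + 1 : Nat) : Int)) = (1 + (t : Int)) + 1 from by push_cast; ring]
      exact PySem.List.pyRange_one_succ_right (by omega)
    rw [hr, List.foldl_append]
    set st := (PySem.List.pyRange 1 (1 + (t : Int)) 1).foldl (pvStepA k)
      (List.replicate N a0, List.replicate N b0) with hst
    simp only [List.foldl_cons, List.foldl_nil]
    have htn : (1 + (t : Int)).toNat = t + 1 := by omega
    have htm : (1 + (t : Int)) - 1 = (t : Int) := by ring
    have hc : (1 + (t : Int)) = ((t + 1 : Nat) : Int) := by push_cast; ring
    have hget2 : PySem.List.pyGet? st.2 ((1 + (t : Int)) - 1) = some ((pvSeq k a0 b0 t).2) := by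
      rw [htm, PySem.List.pyGet?_natCast]
      exact (h3 t le_rfl).2
    have hgetA1 : ∀ v : Int, PySem.List.pyGet? (st.1.set (t + 1) v) ((1 + (t : Int)) - 1)
        = some ((pvSeq k a0 b0 t).1) := by
      intro v
      rw [htm, PySem.List.pyGet?_natCast, List.getElem?_set_ne (by omega)]
      exact (h3 t le_rfl).1
    have hgetA2 : ∀ v : Int, PySem.List.pyGet? (st.1.set (t + 1) v) (1 + (t : Int))
        = some v := by
      intro v
      rw [hc, PySem.List.pyGet?_natCast]
      exact List.getElem?_set_self (by rw [h1]; omega)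
    simp only [pvStepA, htn, hget2, Option.getD_some, hgetA1, hgetA2]
    have hseq1 : (pvSeq k a0 b0 (t + 1)).1 = PySem.Int.mod (pvSeq k a0 b0 t).2 (10 ^ 9 + 7) := rfl
    have hseq2 : (pvSeq k a0 b0 (t + 1)).2
        = PySem.Int.mod (((pvSeq k a0 b0 t).1 + (pvSeq k a0 b0 t).2) * (k - 1)
            - PySem.Int.mod (pvSeq k a0 b0 t).2 (10 ^ 9 + 7)) (10 ^ 9 + 7) := rfl
    refine ⟨by simp [List.length_set, h1], by simp [List.length_set, h2], ?_⟩
    intro j hj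
    by_cases hjt : j = t + 1
    · subst hjt
      constructor
      · rw [List.getElem?_set_self (by rw [h1]; omega), hseq1]
      · rw [List.getElem?_set_self (by rw [h2]; omega), hseq2]
    · have hjle : j ≤ t := by omega
      constructor
      · rw [List.getElem?_set_ne (by omega)]
        exact (h3 j hjle).1
      · rw [List.getElem?_set_ne (by omega)]
        exact (h3 j hjle).2

-- A's output is the last DP cell, reduced
lemma pv_countArray_eq_seq (n k x : Int) (hn : 1 ≤ n) :
    countArray n k x =
      PySem.Int.mod ((pvSeq k (if x ≠ 1 then 0 else 1) (if x ≠ 1 then 1 else 0) (n.toNat - 1)).1)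
        (10 ^ 9 + 7) := by
  have hrange : n = 1 + ((n.toNat - 1 : Nat) : Int) := by omega
  simp only [countArray]
  rw [← apply_ite (fun v : Int => List.replicate n.toNat v),
      ← apply_ite (fun v : Int => List.replicate n.toNat v),
      congrArg (fun z => PySem.List.pyRange 1 z 1) hrange]
  obtain ⟨hL1, hL2, hidx⟩ := pv_fold_inv k (if x ≠ 1 then 0 else 1) (if x ≠ 1 then 1 else 0)
    n.toNat (n.toNat - 1) (by omega)
  rw [PySem.List.pyGet?_neg_one, List.getLast?_eq_getElem?, hL1,
      (hidx (n.toNat - 1) le_rfl).1, Option.getD_some]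

lemma pv_alt_bounds (n k x : Int) :
    0 ≤ countArray_alt n k x ∧ countArray_alt n k x < 10 ^ 9 + 7 := by
  have hP : (0 : Int) < pvP := by norm_num [pvP]
  simp only [countArray_alt, pvS]
  split_ifs <;> constructor <;>
    rw [PySem.Int.mod_eq_emod_of_pos hP] <;>
    first
      | exact Int.emod_nonneg _ (by norm_num [pvP])
      | exact lt_of_lt_of_eq (Int.emod_lt_of_pos _ hP) (by norm_num [pvP])

lemma pv_int_eq_of_cast (u v : Int) (hu0 : 0 ≤ u) (hu : u < 10 ^ 9 + 7) (hv0 : 0 ≤ v)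
    (hv : v < 10 ^ 9 + 7) (h : (u : ZMod pvPN) = (v : ZMod pvPN)) : u = v := by
  have h2 := (ZMod.intCast_eq_intCast_iff' u v pvPN).mp h
  have e : ((pvPN : Nat) : Int) = 10 ^ 9 + 7 := by norm_num [pvPN]
  rw [e, Int.emod_eq_of_lt hu0 hu, Int.emod_eq_of_lt hv0 hv] at h2
  exact h2

-- ===== VERDICT (by name: the statement is the Claim_ definition above) =====
theorem countArray_spec : Claim_equal_countArray := by
  unfold Claim_equal_countArray
  intro n k x hdom hpre
  unfold Spec_countArray
  have hn : 1 ≤ n := hpre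
  have hP : (0 : Int) < 10 ^ 9 + 7 := by norm_num
  rw [pv_countArray_eq_seq n k x hn]
  have hrcast : ((PySem.Int.mod (-(k - 1)) pvP : Int) : ZMod pvPN) = -((k : ZMod pvPN) - 1) := by
    rw [pv_cast_modP]
    push_cast
    ring
  apply pv_int_eq_of_cast
  · rw [PySem.Int.mod_eq_emod_of_pos hP]
    exact Int.emod_nonneg _ (by norm_num)
  · rw [PySem.Int.mod_eq_emod_of_pos hP]
    exact Int.emod_lt_of_pos _ hP
  · exact (pv_alt_bounds n k x).1
  · exact (pv_alt_bounds n k x).2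
  · rw [pv_cast_mod]
    by_cases hx : x = 1
    · subst hx
      rw [if_neg (by simp), if_neg (by simp)]
      simp only [countArray_alt, if_true]
      by_cases hn1 : n = 1
      · subst hn1
        norm_num [pvSeq, pv_cast_modP]
      · have hm : n.toNat - 1 = (n.toNat - 2) + 1 := by omega
        rw [if_neg hn1, hm, (pvSeq_cast_eq1 k (n.toNat - 2 + 1)).1, pv_cast_modP]
        push_cast
        rw [pvS_cast, hrcast, show (n - 2).toNat = n.toNat - 2 from by omega]
        simp only [pvD, pvC]
    · rw [if_pos hx, if_pos hx]
      simp only [countArray_alt, if_neg hx]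
      rw [(pvSeq_cast_ne1 k (n.toNat - 1)).1, pvS_cast, hrcast,
        show (n - 1).toNat = n.toNat - 1 from by omega]
      simp only [pvC]
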